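-- pv_equiv track=rewrite | github.com/Eshuredd/CD_Lab | src/backend/x86_64.py | _nasm_string
-- ===== SOURCE A (Python) =====
-- def _nasm_string(val: str) -> str:
--     parts, buf, i = [], "", 0
--     while i < len(val):
--         c = val[i]
--         if c == "\\" and i + 1 < len(val):
--             esc = val[i + 1]
--             if buf:
--                 parts.append(f'"{buf}"')
--                 buf = ""
--             m = {"n": "10", "t": "9", "r": "13", "0": "0", "\\": "92", '"': "34", "'": "39"}
--             parts.append(m.get(esc, f'"{esc}"'))
--             i += 2
--         elif c == '"':
--             if buf:
--                 parts.append(f'"{buf}"')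
--                 buf = ""
--             parts.append("34")
--             i += 1
--         else:
--             buf += c
--             i += 1
--     if buf:
--         parts.append(f'"{buf}"')
--     return ", ".join(parts) if parts else '""'
-- ===== SOURCE B (Python) =====
-- _ESC = {"n": "10", "t": "9", "r": "13", "0": "0", "\\": "92", '"': "34", "'": "39"}
--
--
-- def _tokenize(val):
--     # pass 1: flat list of typed tokens
--     toks = []
--     i, n = 0, len(val)
--     while i < n:
--         c = val[i]
--         if c == "\\" and i + 1 < n:
--             toks.append(('s', _ESC.get(val[i + 1], f'"{val[i + 1]}"')))
--             i += 2
--         elif c == '"':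
--             toks.append(('s', '34'))
--             i += 1
--         else:
--             toks.append(('c', c))
--             i += 1
--     return toks
--
--
-- def _nasm_string(val: str) -> str:
--     # pass 2: group consecutive literal chars, splice standalones between
--     parts, buf = [], ""
--     for kind, v in _tokenize(val):
--         if kind == 'c':
--             buf += v
--         else:
--             if buf:
--                 parts.append(f'"{buf}"')
--                 buf = ""
--             parts.append(v)
--     if buf:
--         parts.append(f'"{buf}"')
--     return ", ".join(parts) if parts else '""'
-- ===== Notes on version B (the rewrite author's own statement) =====
-- stated objective: alternative
-- what changed: B splits A's single stateful scan into two passes: a tokenizer that classifies each source position into literal-char or standalone-number tokens, and a separate grouping pass that wraps runs of literal chars in quotes and splices the standalones in.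
import Mathlib
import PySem

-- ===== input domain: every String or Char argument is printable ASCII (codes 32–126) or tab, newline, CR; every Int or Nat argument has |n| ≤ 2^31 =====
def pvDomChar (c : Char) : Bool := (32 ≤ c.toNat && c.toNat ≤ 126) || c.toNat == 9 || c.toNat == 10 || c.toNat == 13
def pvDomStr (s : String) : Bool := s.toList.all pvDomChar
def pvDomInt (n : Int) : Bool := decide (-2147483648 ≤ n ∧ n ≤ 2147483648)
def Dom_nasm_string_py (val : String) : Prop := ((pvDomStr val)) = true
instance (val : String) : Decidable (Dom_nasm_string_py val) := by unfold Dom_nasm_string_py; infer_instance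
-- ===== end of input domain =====

-- B re-decomposes A's single stateful scan into a tokenizing pass plus a grouping pass; same cost, no speed claim.

-- ===== PORT A =====
-- m.get(esc, f'"{esc}"')
def nasmEsc (e : Char) : String :=
  if e = 'n' then "10"
  else if e = 't' then "9"
  else if e = 'r' then "13"
  else if e = '0' then "0"
  else if e = '\\' then "92"
  else if e = '"' then "34"
  else if e = '\'' then "39"
  else "\"" ++ String.mk [e] ++ "\""

-- the while loop of A: state = (remaining input, parts, buf)
def nasmLoopA : List Char → List String → List Char → List String
  | [], parts, buf =>
      if buf = [] then parts else parts ++ ["\"" ++ String.mk buf ++ "\""]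
  | '\\' :: e :: rest, parts, buf =>
      nasmLoopA rest ((if buf = [] then parts else parts ++ ["\"" ++ String.mk buf ++ "\""]) ++ [nasmEsc e]) []
  | '"' :: rest, parts, buf =>
      nasmLoopA rest ((if buf = [] then parts else parts ++ ["\"" ++ String.mk buf ++ "\""]) ++ ["34"]) []
  | c :: rest, parts, buf =>
      nasmLoopA rest parts (buf ++ [c])

def nasm_string_py (val : String) : String :=
  let parts := nasmLoopA val.toList [] []
  if parts = [] then "\"\"" else String.intercalate ", " parts

-- ===== PORT B =====
inductive NasmTok where
  | ch : Char → NasmTok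
  | std : String → NasmTok
deriving DecidableEq, Repr

-- pass 1 of B: classify each position into a token
def nasmTokenize : List Char → List NasmTok
  | [] => []
  | '\\' :: e :: rest => .std (nasmEsc e) :: nasmTokenize rest
  | '"' :: rest => .std "34" :: nasmTokenize rest
  | c :: rest => .ch c :: nasmTokenize rest

-- pass 2 of B: group runs of literal chars, splice standalones in
def nasmGroup : List NasmTok → List String → List Char → List String
  | [], parts, buf =>
      parts ++ (if buf = [] then [] else ["\"" ++ String.mk buf ++ "\""])
  | .ch c :: ts, parts, buf => nasmGroup ts parts (buf ++ [c])
  | .std s :: ts, parts, buf =>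
      nasmGroup ts (parts ++ (if buf = [] then [] else ["\"" ++ String.mk buf ++ "\""]) ++ [s]) []

def nasm_string_py_alt (val : String) : String :=
  let parts := nasmGroup (nasmTokenize val.toList) [] []
  if parts = [] then "\"\"" else String.intercalate ", " parts

-- ===== PRECONDITION & SPEC =====
def Spec_nasm_string_py (val : String) (out : String) : Prop := out = nasm_string_py_alt val
instance (val : String) (out : String) : Decidable (Spec_nasm_string_py val out) := by unfold Spec_nasm_string_py; infer_instance

-- ===== CLAIM (what is proved, stated in full; the proofs are below) =====
def Claim_equal_nasm_string_py : Prop := ∀ (val : String), Dom_nasm_string_py val → Spec_nasm_string_py val (nasm_string_py val)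

-- ===== LEMMAS AND PROOFS =====
lemma nasm_loop_eq_group (l : List Char) :
    ∀ parts buf, nasmLoopA l parts buf = nasmGroup (nasmTokenize l) parts buf := by
  induction l using nasmTokenize.induct with
  | case1 =>
      intro parts buf
      simp [nasmLoopA, nasmTokenize, nasmGroup]
      split_ifs <;> simp
  | case2 e rest ih =>
      intro parts buf
      simp only [nasmLoopA, nasmTokenize, nasmGroup, ih]
      congr 1
      split_ifs <;> simp
  | case3 rest ih =>
      intro parts buf
      simp only [nasmLoopA, nasmTokenize, nasmGroup, ih]
      congr 1
      split_ifs <;> simp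
  | case4 c rest h1 h2 ih =>
      intro parts buf
      rw [nasmLoopA, nasmTokenize, nasmGroup, ih] <;> first | exact h1 | exact h2

-- ===== VERDICT (by name: the statement is the Claim_ definition above) =====
theorem nasm_string_py_spec : Claim_equal_nasm_string_py := by
  intro val _
  unfold Spec_nasm_string_py nasm_string_py nasm_string_py_alt
  rw [nasm_loop_eq_group]
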